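-- pv_equiv track=rewrite | github.com/yusoojeong/SW_study | 2020/Programmers/2020 Line/01.py | solution
-- ===== SOURCE A (Python) =====
-- def solution(boxes):
--     answer = 0
--     check_list = [0] * 1000000
--
--     for goods in boxes:
--         if goods[0] != goods[1]:
--             answer += 1
--             check_list[goods[0]] += 1
--             check_list[goods[1]] += 1
--             if check_list[goods[0]] == 2:
--                 check_list[goods[0]] = 0
--                 answer -= 1
--             if check_list[goods[1]] == 2:
--                 check_list[goods[1]] = 0
--                 answer -= 1
--
--     return answer
-- ===== SOURCE B (Python) =====
-- def solution(boxes):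
--     filtered = [g for g in boxes if g[0] != g[1]]
--     counts = {}
--     for g in filtered:
--         for v in (g[0], g[1]):
--             counts[v] = counts.get(v, 0) + 1
--     return len(filtered) - sum(c // 2 for c in counts.values())
-- ===== Notes on version B (the rewrite author's own statement) =====
-- stated objective: simpler
-- what changed: Replaces A's per-call 1000000-cell parity array with reset-at-2 toggling by a closed aggregate: filter the unequal boxes, count every endpoint id in a dict, and return N minus the sum of count//2 per id (no million-cell allocation, only the ids actually present are touched).
-- intended difference: On inputs where a negative id v and the id v+1000000 each occur an odd number of times among the boxes' leading id pairs, A wraps v into array cell v+1000000 and returns a total conflating the two distinct ids (A returns 0 on [[-1,2],[999999,2]]), while B counts each id separately (1 there), which is the intended total; A ≠ B is proved everywhere in this region. — e.g. on solution([[-1, 2], [999999, 2]]): A returns 0, B returns 1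
-- outside the precondition, e.g. on solution([[-1, 999999]]): A returns 0, B returns 1; on solution([[-1, 999999], [-1, 999999]]): A returns 0, B returns 0
import Mathlib
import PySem

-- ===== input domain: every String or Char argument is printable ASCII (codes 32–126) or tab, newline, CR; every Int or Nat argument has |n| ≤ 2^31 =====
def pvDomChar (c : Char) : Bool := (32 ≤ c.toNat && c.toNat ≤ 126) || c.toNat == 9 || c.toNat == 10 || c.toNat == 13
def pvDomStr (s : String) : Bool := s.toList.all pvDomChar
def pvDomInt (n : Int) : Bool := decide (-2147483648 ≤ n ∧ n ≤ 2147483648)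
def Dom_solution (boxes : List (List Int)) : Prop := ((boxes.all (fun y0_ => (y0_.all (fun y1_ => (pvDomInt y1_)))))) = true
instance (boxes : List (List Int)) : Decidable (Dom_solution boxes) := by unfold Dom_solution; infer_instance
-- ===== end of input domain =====

-- B replaces A's 1000000-cell parity array (toggle, reset at 2) by a closed aggregate:
-- count every endpoint of the unequal boxes in a dict, answer = N - sum(count // 2).
-- Objective: simpler. Equivalence is proved outside D_solution (A's negative-index wraparound).

-- ===== PORT A =====
-- Python's negative-index normalization for the length-1000000 check_list; exact for
-- indices in [-1000000, 1000000) (Pre_solution's range; outside it Python raises IndexError).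
def pyIdx1M (i : Int) : Int := if i < 0 then i + 1000000 else i

-- check_list = [0] * 1000000 is modeled as a zero-initialized total map Int → Int indexed by
-- the normalized index; exact since every one of the 1000000 cells starts at 0 and only
-- normalized in-range indices are ever read or written (guaranteed by Pre_solution).
-- goods[0] / goods[1] are PySem.List.pyGetD at 0 and 1 (exact: Pre_solution gives length ≥ 2).
def solGo : List (List Int) → (Int → Int) → Int → Int
  | [], _, answer => answer
  | goods :: rest, check, answer =>
    let g0 := PySem.List.pyGetD goods 0 0
    let g1 := PySem.List.pyGetD goods 1 0
    if g0 ≠ g1 then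
      let answer1 := answer + 1
      let i0 := pyIdx1M g0
      let i1 := pyIdx1M g1
      let c1 : Int → Int := fun j => if j = i0 then check j + 1 else check j
      let c2 : Int → Int := fun j => if j = i1 then c1 j + 1 else c1 j
      let p3 : (Int → Int) × Int :=
        if c2 i0 = 2 then ((fun j => if j = i0 then 0 else c2 j), answer1 - 1) else (c2, answer1)
      let p4 : (Int → Int) × Int :=
        if p3.1 i1 = 2 then ((fun j => if j = i1 then 0 else p3.1 j), p3.2 - 1) else (p3.1, p3.2)
      solGo rest p4.1 p4.2
    else
      solGo rest check answer

def solution (boxes : List (List Int)) : Int := solGo boxes (fun _ => 0) 0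

-- ===== PORT B =====
def solution_alt (boxes : List (List Int)) : Int :=
  let filtered := boxes.filter (fun g => PySem.List.pyGetD g 0 0 != PySem.List.pyGetD g 1 0)
  let counts : PySem.Dict Int Int :=
    filtered.foldl (fun d g =>
      [PySem.List.pyGetD g 0 0, PySem.List.pyGetD g 1 0].foldl
        (fun d v => d.insert v (d.getD v 0 + 1)) d) PySem.Dict.empty
  (filtered.length : Int) - ((counts.values.map (fun c => PySem.Int.floordiv c 2)).sum)

-- ===== PRECONDITION & SPEC =====
-- Pre_ excludes the inputs where Python A raises (a box of length < 2, or an unequal box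
-- with an endpoint outside [-1000000, 1000000): IndexError), and additionally the unequal
-- boxes whose two endpoint ids differ by exactly 1000000: both ids land in the same wrapped
-- array cell, which A double-increments past the ==2 test (0→2 or 1→3, in the latter case the
-- cell is dead for the whole rest of the run), an order-dependent leftover of A's
-- implementation that no count-based total can reproduce (see claim cites).
def Pre_solution (boxes : List (List Int)) : Prop :=
  ∀ g ∈ boxes, 2 ≤ g.length ∧
    (PySem.List.pyGetD g 0 0 ≠ PySem.List.pyGetD g 1 0 →
      (-1000000 ≤ PySem.List.pyGetD g 0 0 ∧ PySem.List.pyGetD g 0 0 < 1000000 ∧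
       -1000000 ≤ PySem.List.pyGetD g 1 0 ∧ PySem.List.pyGetD g 1 0 < 1000000 ∧
       PySem.List.pyGetD g 0 0 ≠ PySem.List.pyGetD g 1 0 + 1000000 ∧
       PySem.List.pyGetD g 1 0 ≠ PySem.List.pyGetD g 0 0 + 1000000))
instance (boxes : List (List Int)) : Decidable (Pre_solution boxes) := by
  unfold Pre_solution; infer_instance

def pvWitness_solution : List (List Int) := [[1, 2], [3, 1], [5, 5]]

def pvT (boxes : List (List Int)) : List Int := boxes.flatMap (List.take 2)

-- On inputs where a negative id v and the id v+1000000 each occur an odd number of times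
-- among the boxes' leading id pairs, A silently wraps v into array cell v+1000000 and
-- returns a total that conflates the two distinct ids, while B counts each id separately,
-- which is the intended behaviour (A ≠ B everywhere here: solution_tight).
def D_solution (boxes : List (List Int)) : Prop :=
  ∃ v ∈ pvT boxes, v < 0 ∧ (pvT boxes).count v % 2 = 1 ∧
    (pvT boxes).count (v + 1000000) % 2 = 1
instance (boxes : List (List Int)) : Decidable (D_solution boxes) := by
  unfold D_solution; infer_instance

def Spec_solution (boxes : List (List Int)) (out : Int) : Prop :=
  ¬ D_solution boxes → out = solution_alt boxes
instance (boxes : List (List Int)) (out : Int) : Decidable (Spec_solution boxes out) := by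
  unfold Spec_solution; infer_instance

def pvDiffWitness_solution : List (List Int) := [[-1, 2], [999999, 2]]
def pvDiffWitnessOut_solution : Int × Int := (0, 1)

-- ===== CLAIM (what is proved, stated in full; the proofs are below) =====
def Claim_unchanged_solution : Prop :=
  ∀ (boxes : List (List Int)), Dom_solution boxes → Pre_solution boxes →
    Spec_solution boxes (solution boxes)
def Claim_changed_solution : Prop :=
  Dom_solution (pvDiffWitness_solution) ∧ Pre_solution (pvDiffWitness_solution) ∧
  D_solution (pvDiffWitness_solution) ∧
  solution (pvDiffWitness_solution) = pvDiffWitnessOut_solution.1 ∧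
  solution_alt (pvDiffWitness_solution) = pvDiffWitnessOut_solution.2 ∧
  pvDiffWitnessOut_solution.1 ≠ pvDiffWitnessOut_solution.2
def Claim_exact_solution : Prop :=
  ∀ (boxes : List (List Int)), Dom_solution boxes → Pre_solution boxes → D_solution boxes →
    solution boxes ≠ solution_alt boxes

-- ===== LEMMAS AND PROOFS =====

def pvCond (g : List Int) : Bool := PySem.List.pyGetD g 0 0 != PySem.List.pyGetD g 1 0
def pvEnds (boxes : List (List Int)) : List Int :=
  (boxes.filter (fun g => PySem.List.pyGetD g 0 0 != PySem.List.pyGetD g 1 0)).flatMap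
    (fun g => [PySem.List.pyGetD g 0 0, PySem.List.pyGetD g 1 0])

lemma ends_mem_take (g : List Int) (hg : 2 ≤ g.length) :
    PySem.List.pyGetD g 0 0 ∈ g.take 2 ∧ PySem.List.pyGetD g 1 0 ∈ g.take 2 := by
  match g, hg with
  | a :: b :: t, _ =>
    constructor <;> simp [PySem.List.pyGetD_ofNat']

lemma mem_pvEnds_take (boxes : List (List Int)) (hpre : Pre_solution boxes) (v : Int)
    (hv : v ∈ pvEnds boxes) : ∃ h ∈ boxes, v ∈ h.take 2 := by
  unfold pvEnds at hv
  rcases List.mem_flatMap.mp hv with ⟨g, hgf, hvm⟩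
  rcases List.mem_filter.mp hgf with ⟨hgb, _⟩
  have hm := ends_mem_take g (hpre g hgb).1
  simp only [List.mem_cons, List.not_mem_nil, or_false] at hvm
  rcases hvm with rfl | rfl
  · exact ⟨g, hgb, hm.1⟩
  · exact ⟨g, hgb, hm.2⟩

def pvPairs (es : List Int) : ℕ := ∑ v ∈ es.toFinset, es.count v / 2

lemma pvPairs_append_singleton (s : List Int) (x : Int) :
    pvPairs (s ++ [x]) = pvPairs s + s.count x % 2 := by
  classical
  have hcnt : ∀ v : Int, (s ++ [x]).count v = s.count v + if v = x then 1 else 0 := by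
    intro v
    by_cases h : v = x
    · subst h; simp [List.count_append]
    · have h0 : List.count v [x] = 0 := List.count_eq_zero.mpr (by simp [h])
      simp [List.count_append, h, h0]
  have hto : (s ++ [x]).toFinset = insert x s.toFinset := by
    simp [List.toFinset_append, Finset.union_singleton]
  by_cases hx : x ∈ s.toFinset
  · have hins : insert x s.toFinset = s.toFinset := Finset.insert_eq_self.mpr hx
    unfold pvPairs
    rw [hto, hins]
    rw [← Finset.sum_erase_add _ _ hx, ← Finset.sum_erase_add _ (fun v => s.count v / 2) hx]
    have hrest : ∑ v ∈ s.toFinset.erase x, (s ++ [x]).count v / 2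
        = ∑ v ∈ s.toFinset.erase x, s.count v / 2 := by
      apply Finset.sum_congr rfl
      intro v hv
      have hvx : v ≠ x := Finset.ne_of_mem_erase hv
      rw [hcnt v]; simp [hvx]
    rw [hrest, hcnt x]
    simp only [if_true, eq_self_iff_true]
    omega
  · have hx' : x ∉ s := by simpa using hx
    have hc0 : s.count x = 0 := List.count_eq_zero.mpr hx'
    unfold pvPairs
    rw [hto, Finset.sum_insert hx]
    have hrest : ∑ v ∈ s.toFinset, (s ++ [x]).count v / 2
        = ∑ v ∈ s.toFinset, s.count v / 2 := by
      apply Finset.sum_congr rfl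
      intro v hv
      have hvx : v ≠ x := by rintro rfl; exact hx hv
      rw [hcnt v]; simp [hvx]
    rw [hrest, hcnt x]
    simp [hc0]


lemma count_map_pyIdx (E : List Int) (hr : ∀ v ∈ E, -1000000 ≤ v ∧ v < 1000000)
    (r : Int) (h0 : 0 ≤ r) (h1 : r < 1000000) :
    (E.map pyIdx1M).count r = E.count r + E.count (r - 1000000) := by
  induction E with
  | nil => simp
  | cons v tl ih =>
    have hv := hr v (List.mem_cons_self ..)
    have htl : ∀ w ∈ tl, -1000000 ≤ w ∧ w < 1000000 :=
      fun w hw => hr w (List.mem_cons_of_mem _ hw)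
    simp only [List.map_cons, List.count_cons, beq_iff_eq]
    rw [ih htl]
    unfold pyIdx1M
    split_ifs <;> omega


lemma pvPairs_map_pyIdx (E : List Int)
    (hr : ∀ v ∈ E, -1000000 ≤ v ∧ v < 1000000) :
    pvPairs (E.map pyIdx1M) = pvPairs E
      + ∑ r ∈ (E.map pyIdx1M).toFinset,
          (E.count r % 2) * (E.count (r - 1000000) % 2) := by
  classical
  unfold pvPairs
  have htf : (E.map pyIdx1M).toFinset = E.toFinset.image pyIdx1M := by
    apply Finset.ext
    intro r
    simp [List.mem_toFinset, List.mem_map, Finset.mem_image]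
  rw [htf]
  set S := E.toFinset with hS
  set T := S.image pyIdx1M with hT
  have hmemS : ∀ v : Int, v ∈ S ↔ v ∈ E := fun v => List.mem_toFinset
  have hTrange : ∀ r ∈ T, 0 ≤ r ∧ r < 1000000 := by
    intro r hrT
    rcases Finset.mem_image.mp hrT with ⟨v, hvS, rfl⟩
    have := hr v ((hmemS v).mp hvS)
    unfold pyIdx1M; split_ifs <;> omega
  have hstep : ∑ r ∈ T, (E.map pyIdx1M).count r / 2
      = ∑ r ∈ T, (E.count r / 2 + E.count (r - 1000000) / 2
          + (E.count r % 2) * (E.count (r - 1000000) % 2)) := by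
    apply Finset.sum_congr rfl
    intro r hrT
    have hrg := hTrange r hrT
    rw [count_map_pyIdx E hr r hrg.1 hrg.2]
    rcases Nat.mod_two_eq_zero_or_one (E.count r) with h1 | h1 <;>
      rcases Nat.mod_two_eq_zero_or_one (E.count (r - 1000000)) with h2 | h2 <;>
        simp only [h1, h2] <;> omega
  rw [hstep, Finset.sum_add_distrib, Finset.sum_add_distrib]
  have hsplit : ∑ v ∈ S, E.count v / 2
      = ∑ v ∈ S.filter (fun v => v < 0), E.count v / 2
        + ∑ v ∈ S.filter (fun v => ¬ v < 0), E.count v / 2 :=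
    (Finset.sum_filter_add_sum_filter_not S _ _).symm
  set N := S.filter (fun v => v < 0) with hN
  set P := S.filter (fun v => ¬ v < 0) with hP
  have hA : ∑ r ∈ T, E.count r / 2 = ∑ v ∈ P, E.count v / 2 := by
    symm
    apply Finset.sum_subset
    · intro v hv
      rcases Finset.mem_filter.mp hv with ⟨hvS, hvn⟩
      exact Finset.mem_image.mpr ⟨v, hvS, by unfold pyIdx1M; simp at hvn ⊢; omega⟩
    · intro r hrT hrP
      have hrg := hTrange r hrT
      by_cases hz : E.count r = 0
      · omega
      · exfalso
        have hmem : r ∈ S := (hmemS r).mpr (by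
          by_contra hcon; exact hz (List.count_eq_zero.mpr hcon))
        exact hrP (Finset.mem_filter.mpr ⟨hmem, by omega⟩)
  have hB : ∑ r ∈ T, E.count (r - 1000000) / 2 = ∑ v ∈ N, E.count v / 2 := by
    have himg : ∑ r ∈ N.image (fun v => v + 1000000), E.count (r - 1000000) / 2
        = ∑ v ∈ N, E.count v / 2 := by
      have hinj : ∀ x ∈ N, ∀ y ∈ N, x + 1000000 = y + 1000000 → x = y := by
        intro x _ y _ h; omega
      rw [Finset.sum_image hinj]
      apply Finset.sum_congr rfl
      intro v _
      have : v + 1000000 - 1000000 = v := by ring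
      rw [this]
    rw [← himg]
    symm
    apply Finset.sum_subset
    · intro r hrN'
      rcases Finset.mem_image.mp hrN' with ⟨v, hvN, rfl⟩
      rcases Finset.mem_filter.mp hvN with ⟨hvS, hvneg⟩
      refine Finset.mem_image.mpr ⟨v, hvS, ?_⟩
      unfold pyIdx1M; simp [if_pos hvneg]
    · intro r hrT hrN'
      have hrg := hTrange r hrT
      by_cases hz : E.count (r - 1000000) = 0
      · omega
      · exfalso
        have hmem : (r - 1000000) ∈ S := (hmemS _).mpr (by
          by_contra hcon; exact hz (List.count_eq_zero.mpr hcon))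
        have hneg : r - 1000000 < 0 := by omega
        refine hrN' (Finset.mem_image.mpr ⟨r - 1000000, Finset.mem_filter.mpr ⟨hmem, hneg⟩, by ring⟩)
  rw [hA, hB, hsplit]
  omega


lemma nodup_map_sum (m : List Int) (hm : m.Nodup) (g : Int → ℕ) :
    (m.map g).sum = ∑ v ∈ m.toFinset, g v := by
  induction m with
  | nil => simp
  | cons x tl ih =>
    rcases List.nodup_cons.mp hm with ⟨hx, htl⟩
    simp only [List.map_cons, List.sum_cons, List.toFinset_cons]
    rw [Finset.sum_insert (by simpa using hx), ih htl]


lemma foldl_pairs (step : PySem.Dict Int Int → Int → PySem.Dict Int Int)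
    (l : List (List Int)) (d : PySem.Dict Int Int) :
    l.foldl (fun d g =>
        [PySem.List.pyGetD g 0 0, PySem.List.pyGetD g 1 0].foldl step d) d
      = (l.flatMap (fun g => [PySem.List.pyGetD g 0 0, PySem.List.pyGetD g 1 0])).foldl step d := by
  induction l generalizing d with
  | nil => simp
  | cons g tl ih =>
    simp only [List.foldl_cons, List.flatMap_cons, List.foldl_append]
    exact ih _


lemma solution_alt_char (boxes : List (List Int)) :
    solution_alt boxes = ((boxes.filter pvCond).length : Int) - (pvPairs (pvEnds boxes) : Int) := by
  unfold solution_alt pvCond pvEnds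
  simp only
  rw [foldl_pairs, PySem.Dict.foldl_insert_getD_add_one_eq_counter]
  congr 1
  set E := (boxes.filter (fun g => PySem.List.pyGetD g 0 0 != PySem.List.pyGetD g 1 0)).flatMap
    (fun g => [PySem.List.pyGetD g 0 0, PySem.List.pyGetD g 1 0]) with hE
  have hvals : (PySem.Dict.counter E).values
      = (PySem.List.dedup E).map (fun k => (E.count k : Int)) := by
    show ((PySem.Dict.counter E).items.map (·.2)) = _
    rw [PySem.Dict.items_counter]
    simp [List.map_map, Function.comp]
  rw [hvals]
  rw [List.map_map]
  have hmap : ((fun c => PySem.Int.floordiv c 2) ∘ fun k => (E.count k : Int))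
      = fun k => ((E.count k / 2 : ℕ) : Int) := by
    funext k
    simp [Function.comp]
  rw [hmap]
  have : (PySem.List.dedup E).map (fun k => ((E.count k / 2 : ℕ) : Int))
      = ((PySem.List.dedup E).map (fun k => E.count k / 2)).map (fun n : ℕ => (n : Int)) := by
    simp [List.map_map, Function.comp]
  rw [this, ← Nat.cast_list_sum]
  congr 1
  unfold pvPairs
  have hnd : (PySem.List.dedup E).Nodup := PySem.List.nodup_dedup E
  have htf : (PySem.List.dedup E).toFinset = E.toFinset := by
    apply Finset.ext; intro v; simp [PySem.List.mem_dedup]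
  rw [nodup_map_sum _ hnd, htf]


lemma solGo_cons_ne (g : List Int) (bs : List (List Int)) (check : Int → Int) (ans : Int)
    (hg : ¬ PySem.List.pyGetD g 0 0 = PySem.List.pyGetD g 1 0)
    (hne : pyIdx1M (PySem.List.pyGetD g 0 0) ≠ pyIdx1M (PySem.List.pyGetD g 1 0)) :
    solGo (g :: bs) check ans =
      solGo bs
        (fun j => if j = pyIdx1M (PySem.List.pyGetD g 0 0) then
                    (if check (pyIdx1M (PySem.List.pyGetD g 0 0)) + 1 = 2 then 0
                     else check (pyIdx1M (PySem.List.pyGetD g 0 0)) + 1)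
                  else if j = pyIdx1M (PySem.List.pyGetD g 1 0) then
                    (if check (pyIdx1M (PySem.List.pyGetD g 1 0)) + 1 = 2 then 0
                     else check (pyIdx1M (PySem.List.pyGetD g 1 0)) + 1)
                  else check j)
        (ans + 1 - (if check (pyIdx1M (PySem.List.pyGetD g 0 0)) + 1 = 2 then 1 else 0)
               - (if check (pyIdx1M (PySem.List.pyGetD g 1 0)) + 1 = 2 then 1 else 0)) := by
  simp only [solGo]
  rw [if_pos hg]
  set i0 := pyIdx1M (PySem.List.pyGetD g 0 0) with hi0
  set i1 := pyIdx1M (PySem.List.pyGetD g 1 0) with hi1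
  simp only [if_neg hne, if_true]
  by_cases hA : check i0 + 1 = 2 <;> by_cases hB : check i1 + 1 = 2 <;>
    simp only [hA, hB, ite_true, ite_false, eq_self_iff_true, if_true, if_false,
      if_neg (Ne.symm hne)] <;>
    (refine congrArg₂ (solGo bs) (funext fun j => ?_) (by ring)
     by_cases hj1 : j = i1 <;> by_cases hj0 : j = i0
     · exact absurd (hj0.symm.trans hj1) hne
     all_goals simp [hj0, hj1, hne, Ne.symm hne, hA, hB])


lemma solGo_char (bs : List (List Int)) : ∀ (s : List Int) (check : Int → Int) (ans : Int),
    (∀ g ∈ bs, pvCond g = true →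
      pyIdx1M (PySem.List.pyGetD g 0 0) ≠ pyIdx1M (PySem.List.pyGetD g 1 0)) →
    (∀ j, check j = ((s.count j % 2 : ℕ) : Int)) →
    solGo bs check ans +
      (pvPairs (s ++ (bs.filter pvCond).flatMap
        (fun g => [pyIdx1M (PySem.List.pyGetD g 0 0), pyIdx1M (PySem.List.pyGetD g 1 0)])) : Int)
      = ans + ((bs.filter pvCond).length : Int) + (pvPairs s : Int) := by
  induction bs with
  | nil => intro s check ans _ _; simp [solGo]
  | cons g bs ih =>
    intro s check ans hinj hch
    by_cases hg : PySem.List.pyGetD g 0 0 = PySem.List.pyGetD g 1 0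
    · have hcond : pvCond g = false := by simp [pvCond, hg]
      have h1 : (g :: bs).filter pvCond = bs.filter pvCond := by
        simp [List.filter_cons, hcond]
      rw [h1]
      have h2 : solGo (g :: bs) check ans = solGo bs check ans := by
        simp only [solGo]
        rw [if_neg (by simpa using hg)]
      rw [h2]
      exact ih s check ans (fun g' hg' => hinj g' (List.mem_cons_of_mem _ hg')) hch
    · have hcond : pvCond g = true := by simp [pvCond, hg]
      have hne : pyIdx1M (PySem.List.pyGetD g 0 0) ≠ pyIdx1M (PySem.List.pyGetD g 1 0) :=
        hinj g (List.mem_cons_self ..) hcond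
      set i0 := pyIdx1M (PySem.List.pyGetD g 0 0) with hi0
      set i1 := pyIdx1M (PySem.List.pyGetD g 1 0) with hi1
      have h1 : (g :: bs).filter pvCond = g :: bs.filter pvCond := by
        simp [hcond]
      rw [h1]
      rw [solGo_cons_ne g bs check ans hg hne]
      set SF := (fun j => if j = i0 then
                    (if check i0 + 1 = 2 then 0 else check i0 + 1)
                  else if j = i1 then
                    (if check i1 + 1 = 2 then 0 else check i1 + 1)
                  else check j) with hSF
      set AF := (ans + 1 - (if check i0 + 1 = 2 then 1 else 0)
                       - (if check i1 + 1 = 2 then 1 else 0)) with hAF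
      have hc01 : List.count i0 [i0, i1] = 1 := by
        simp [List.count_cons, Ne.symm hne]
      have hc11 : List.count i1 [i0, i1] = 1 := by
        simp [List.count_cons, hne]
      have hch' : ∀ j, SF j = ((((s ++ [i0, i1]).count j) % 2 : ℕ) : Int) := by
        intro j
        by_cases hj0 : j = i0
        · rw [hSF, hj0]
          simp only [if_pos rfl]
          rw [hch i0]
          have hcnt : (s ++ [i0, i1]).count i0 = s.count i0 + 1 := by
            rw [List.count_append, hc01]
          rw [hcnt]
          rcases Nat.mod_two_eq_zero_or_one (s.count i0) with h | h <;>
            · rw [h]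
              have h2 : (s.count i0 + 1) % 2 = 1 - s.count i0 % 2 := by omega
              rw [h2, h]
              norm_num
        · by_cases hj1 : j = i1
          · rw [hSF, hj1]
            simp only [if_neg (Ne.symm hne), if_pos rfl]
            rw [hch i1]
            have hcnt : (s ++ [i0, i1]).count i1 = s.count i1 + 1 := by
              rw [List.count_append, hc11]
            rw [hcnt]
            rcases Nat.mod_two_eq_zero_or_one (s.count i1) with h | h <;>
              · rw [h]
                have h2 : (s.count i1 + 1) % 2 = 1 - s.count i1 % 2 := by omega
                rw [h2, h]
                norm_num
          · rw [hSF]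
            simp only [if_neg hj0, if_neg hj1]
            rw [hch j]
            have hcnt : (s ++ [i0, i1]).count j = s.count j := by
              rw [List.count_append]
              have : List.count j [i0, i1] = 0 := by
                simp only [List.count_cons, List.count_nil, beq_iff_eq]
                have h1' : ¬ i0 = j := fun h => hj0 h.symm
                have h2' : ¬ i1 = j := fun h => hj1 h.symm
                simp [h1', h2']
              omega
            rw [hcnt]
      have hinj' : ∀ g' ∈ bs, pvCond g' = true →
          pyIdx1M (PySem.List.pyGetD g' 0 0) ≠ pyIdx1M (PySem.List.pyGetD g' 1 0) :=
        fun g' hg' => hinj g' (List.mem_cons_of_mem _ hg')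
      have hIH := ih (s ++ [i0, i1]) SF AF hinj' hch'
      have hd0 : (if check i0 + 1 = 2 then (1:ℤ) else 0) = ((s.count i0 % 2 : ℕ) : Int) := by
        rw [hch i0]
        rcases Nat.mod_two_eq_zero_or_one (s.count i0) with h | h <;> rw [h] <;> norm_num
      have hd1 : (if check i1 + 1 = 2 then (1:ℤ) else 0) = ((s.count i1 % 2 : ℕ) : Int) := by
        rw [hch i1]
        rcases Nat.mod_two_eq_zero_or_one (s.count i1) with h | h <;> rw [h] <;> norm_num
      have e2 : pvPairs (s ++ [i0]) = pvPairs s + s.count i0 % 2 :=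
        pvPairs_append_singleton s i0
      have e3 : pvPairs ((s ++ [i0]) ++ [i1]) = pvPairs (s ++ [i0]) + s.count i1 % 2 := by
        rw [pvPairs_append_singleton]
        have : (s ++ [i0]).count i1 = s.count i1 := by
          rw [List.count_append]
          simp [List.count_cons, hne]
        rw [this]
      have hlist : s ++ [i0, i1] = (s ++ [i0]) ++ [i1] := by simp
      rw [hlist] at hIH
      have hflat : s ++ (g :: bs.filter pvCond).flatMap
          (fun g => [pyIdx1M (PySem.List.pyGetD g 0 0), pyIdx1M (PySem.List.pyGetD g 1 0)])
          = ((s ++ [i0]) ++ [i1]) ++ (bs.filter pvCond).flatMap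
              (fun g => [pyIdx1M (PySem.List.pyGetD g 0 0), pyIdx1M (PySem.List.pyGetD g 1 0)]) := by
        simp only [List.flatMap_cons]
        simp [List.append_assoc]
        exact ⟨hi0.symm, hi1.symm⟩
      rw [hflat]
      rw [hAF, hd0, hd1] at hIH ⊢
      simp only [List.length_cons]
      push_cast
      push_cast at hIH
      omega


lemma mem_pvT_of_pvEnds (boxes : List (List Int)) (hpre : Pre_solution boxes) (v : Int)
    (hv : v ∈ pvEnds boxes) : v ∈ pvT boxes := by
  rcases mem_pvEnds_take boxes hpre v hv with ⟨h, hhb, hhm⟩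
  exact List.mem_flatMap.mpr ⟨h, hhb, hhm⟩

lemma count_pvT_parity (boxes : List (List Int)) : Pre_solution boxes → ∀ x : Int,
    (pvT boxes).count x % 2 = (pvEnds boxes).count x % 2 := by
  induction boxes with
  | nil => intro _ x; rfl
  | cons g bs ih =>
    intro hpre x
    have hpre' : Pre_solution bs := fun g' h => hpre g' (List.mem_cons_of_mem _ h)
    have ihx := ih hpre' x
    have h2 := (hpre g (List.mem_cons_self ..)).1
    match g, h2 with
    | a :: b :: t, _ =>
      have ha : PySem.List.pyGetD (a :: b :: t) 0 0 = a := by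
        simp [PySem.List.pyGetD_ofNat']
      have hb : PySem.List.pyGetD (a :: b :: t) 1 0 = b := by
        simp [PySem.List.pyGetD_ofNat']
      have ht : (a :: b :: t).take 2 = [a, b] := rfl
      unfold pvT pvEnds at ihx ⊢
      simp only [List.flatMap_cons, List.filter_cons, List.count_append, ht, ha, hb]
      have hcab : List.count x [a, b] % 2 = ((if a = x then 1 else 0) + (if b = x then 1 else 0)) % 2 := by
        simp only [List.count_cons, List.count_nil, beq_iff_eq]
        by_cases h0 : x = a <;> by_cases h1 : x = b <;> simp [h0, h1, eq_comm, Nat.add_comm]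
      by_cases hab : a = b
      · have hbne : (a != b) = false := by simp [hab]
        simp only [hbne, Bool.false_eq_true, if_false]
        have hcc : List.count x [a, b] % 2 = 0 := by
          rw [hcab, hab]
          by_cases h1 : b = x <;> simp [h1]
        omega
      · have hbne : (a != b) = true := by simpa using hab
        simp only [hbne, if_true, List.flatMap_cons, List.count_append, ha, hb]
        omega

lemma hinj_of_pre (boxes : List (List Int)) (hpre : Pre_solution boxes) :
    ∀ g ∈ boxes, pvCond g = true →
      pyIdx1M (PySem.List.pyGetD g 0 0) ≠ pyIdx1M (PySem.List.pyGetD g 1 0) := by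
  intro g hgmem hgc
  have hgne : PySem.List.pyGetD g 0 0 ≠ PySem.List.pyGetD g 1 0 := by
    simpa [pvCond] using hgc
  have hr := (hpre g hgmem).2 hgne
  intro heq
  unfold pyIdx1M at heq
  split_ifs at heq <;> omega

lemma hr_of_pre (boxes : List (List Int)) (hpre : Pre_solution boxes) :
    ∀ v ∈ pvEnds boxes, -1000000 ≤ v ∧ v < 1000000 := by
  intro v hv
  unfold pvEnds at hv
  rcases List.mem_flatMap.mp hv with ⟨g, hgf, hvmem⟩
  rcases List.mem_filter.mp hgf with ⟨hgb, hgc⟩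
  have hgne : PySem.List.pyGetD g 0 0 ≠ PySem.List.pyGetD g 1 0 := by
    simpa using hgc
  have hb := (hpre g hgb).2 hgne
  simp only [List.mem_cons, List.not_mem_nil, or_false] at hvmem
  rcases hvmem with rfl | rfl
  · exact ⟨hb.1, hb.2.1⟩
  · exact ⟨hb.2.2.1, hb.2.2.2.1⟩

def pvPen (boxes : List (List Int)) : ℕ :=
  ∑ r ∈ ((pvEnds boxes).map pyIdx1M).toFinset,
    ((pvEnds boxes).count r % 2) * ((pvEnds boxes).count (r - 1000000) % 2)

lemma solution_diff (boxes : List (List Int)) (hpre : Pre_solution boxes) :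
    solution_alt boxes = solution boxes + (pvPen boxes : Int) := by
  have hA := solGo_char boxes [] (fun _ => 0) 0 (hinj_of_pre boxes hpre) (by intro j; simp)
  have hflatmap : (boxes.filter pvCond).flatMap
      (fun g => [pyIdx1M (PySem.List.pyGetD g 0 0), pyIdx1M (PySem.List.pyGetD g 1 0)])
      = (pvEnds boxes).map pyIdx1M := by
    unfold pvEnds pvCond
    simp [List.map_flatMap]
  have hmap := pvPairs_map_pyIdx (pvEnds boxes) (hr_of_pre boxes hpre)
  rw [solution_alt_char]
  have hsol : solution boxes = solGo boxes (fun _ => 0) 0 := rfl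
  rw [hsol]
  rw [hflatmap] at hA
  simp only [List.nil_append] at hA
  rw [hmap] at hA
  have hz : pvPairs ([] : List Int) = 0 := by simp [pvPairs]
  rw [hz] at hA
  unfold pvPen
  omega

lemma pen_zero (boxes : List (List Int)) (hpre : Pre_solution boxes)
    (hnd : ¬ D_solution boxes) : pvPen boxes = 0 := by
  apply Finset.sum_eq_zero
  intro r hrT
  rcases Nat.mod_two_eq_zero_or_one ((pvEnds boxes).count r) with h1 | h1
  · simp [h1]
  rcases Nat.mod_two_eq_zero_or_one ((pvEnds boxes).count (r - 1000000)) with h2 | h2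
  · simp [h2]
  exfalso
  apply hnd
  have hrm : r ∈ (pvEnds boxes).map pyIdx1M := by simpa using hrT
  rcases List.mem_map.mp hrm with ⟨w, hwE, hwr⟩
  have hwb := hr_of_pre boxes hpre w hwE
  have hrg : 0 ≤ r ∧ r < 1000000 := by
    rw [← hwr]; unfold pyIdx1M; split_ifs <;> omega
  have hvmem : (r - 1000000) ∈ pvEnds boxes := by
    by_contra hcon
    rw [List.count_eq_zero.mpr hcon] at h2
    omega
  have hrmem : r ∈ pvEnds boxes := by
    by_contra hcon
    rw [List.count_eq_zero.mpr hcon] at h1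
    omega
  refine ⟨r - 1000000, mem_pvT_of_pvEnds boxes hpre _ hvmem, by omega, ?_, ?_⟩
  · rw [count_pvT_parity boxes hpre]
    exact h2
  · rw [count_pvT_parity boxes hpre]
    have : r - 1000000 + 1000000 = r := by ring
    rw [this]
    exact h1

lemma pen_pos (boxes : List (List Int)) (hpre : Pre_solution boxes)
    (hd : D_solution boxes) : 1 ≤ pvPen boxes := by
  rcases hd with ⟨v, hvT, hvneg, ho1, ho2⟩
  rw [count_pvT_parity boxes hpre] at ho1 ho2
  have hvE : v ∈ pvEnds boxes := by
    by_contra hcon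
    rw [List.count_eq_zero.mpr hcon] at ho1
    omega
  have hrT : (v + 1000000) ∈ ((pvEnds boxes).map pyIdx1M).toFinset := by
    apply List.mem_toFinset.mpr
    apply List.mem_map.mpr
    refine ⟨v, hvE, ?_⟩
    unfold pyIdx1M
    simp [hvneg]
  have hterm : ((pvEnds boxes).count (v + 1000000) % 2)
      * ((pvEnds boxes).count (v + 1000000 - 1000000) % 2) = 1 := by
    have h : v + 1000000 - 1000000 = v := by ring
    rw [h, ho1, ho2]
  have hle := Finset.single_le_sum
    (f := fun r => ((pvEnds boxes).count r % 2) * ((pvEnds boxes).count (r - 1000000) % 2))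
    (fun r _ => Nat.zero_le _) hrT
  simp only at hle
  rw [hterm] at hle
  unfold pvPen
  exact hle

-- ===== VERDICT (by name: the statement is the Claim_ definition above) =====
theorem solution_spec : Claim_unchanged_solution := by
  intro boxes _ hpre hnd
  have hdiff := solution_diff boxes hpre
  have hz := pen_zero boxes hpre hnd
  rw [hz] at hdiff
  simp at hdiff
  exact hdiff.symm

theorem solution_changed : Claim_changed_solution := by
  unfold Claim_changed_solution; decide

theorem solution_tight : Claim_exact_solution := by
  intro boxes _ hpre hd
  have hdiff := solution_diff boxes hpre
  have hp := pen_pos boxes hpre hd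
  omega
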